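-- pv_equiv track=rewrite | github.com/Benjamin31600/ocr-autonome | app.py | highlight_confusions
-- ===== SOURCE A (Python) =====
-- confusion_pairs = {
--     'S': '8',
--     '8': 'S',
--     'O': '0',
--     '0': 'O',
--     'I': '1',
--     '1': 'I',
--     'B': '8',
--     'Z': '2',
-- }
--
-- def highlight_confusions(num):
--     result_html = ""
--     for char in num:
--         if char in confusion_pairs or char in confusion_pairs.values():
--             result_html += f"<span style='color:red; font-weight:bold;'>{char}</span>"
--         else:
--             result_html += char
--     return result_html
-- ===== SOURCE B (Python) =====
-- confusion_pairs = {
--     'S': '8',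
--     '8': 'S',
--     'O': '0',
--     '0': 'O',
--     'I': '1',
--     '1': 'I',
--     'B': '8',
--     'Z': '2',
-- }
--
-- _CONFUSABLE = "S8O0I1BZ2"
-- _WRAP_OPEN = "<span style='color:red; font-weight:bold;'>"
-- _WRAP_CLOSE = "</span>"
--
-- def highlight_confusions(num):
--     # Run-based chunking: scan for maximal runs of plain characters and copy
--     # them as whole slices; wrap each confusable character individually.
--     parts = []
--     i = 0
--     n = len(num)
--     while i < n:
--         j = i
--         while j < n and num[j] not in _CONFUSABLE:
--             j += 1
--         parts.append(num[i:j])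
--         if j < n:
--             parts.append(_WRAP_OPEN + num[j] + _WRAP_CLOSE)
--             j += 1
--         i = j
--     return "".join(parts)
-- ===== Notes on version B (the rewrite author's own statement) =====
-- stated objective: faster
-- what changed: B replaces A's per-character if/else loop with string concatenation by a run-based two-pointer scan: it finds each maximal run of non-confusable characters, copies it as one slice into a parts list, wraps the single confusable character that ends the run, and joins the parts once at the end.
import Mathlib
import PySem

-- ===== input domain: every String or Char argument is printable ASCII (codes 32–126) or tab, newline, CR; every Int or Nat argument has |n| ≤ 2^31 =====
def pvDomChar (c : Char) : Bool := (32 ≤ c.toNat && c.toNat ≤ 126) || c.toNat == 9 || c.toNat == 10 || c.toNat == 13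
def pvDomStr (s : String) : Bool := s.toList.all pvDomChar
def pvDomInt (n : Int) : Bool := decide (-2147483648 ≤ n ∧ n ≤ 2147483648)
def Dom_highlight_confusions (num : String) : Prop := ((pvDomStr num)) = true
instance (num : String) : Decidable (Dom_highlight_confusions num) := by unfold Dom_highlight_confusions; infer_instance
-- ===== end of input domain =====

-- B replaces A's per-character if/else concatenation loop by a run-based scan that copies
-- maximal runs of plain characters as whole slices and wraps each confusable char (objective: alternative).

-- the wrapped HTML for a confusable character
def pvWrap (c : Char) : List Char :=
  "<span style='color:red; font-weight:bold;'>".toList ++ [c] ++ "</span>".toList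

-- ===== PORT A =====
-- keys and values of the module-level confusion_pairs dict
def pvConfKeys : List Char := ['S','8','O','0','I','1','B','Z']
def pvConfVals : List Char := ['8','S','0','O','1','I','8','2']

def highlight_confusions (num : String) : String :=
  String.ofList (num.toList.foldl
    (fun acc c =>
      if pvConfKeys.contains c || pvConfVals.contains c then acc ++ pvWrap c
      else acc ++ [c]) [])

-- ===== PORT B =====
-- the module constant _CONFUSABLE = "S8O0I1BZ2"
def pvConfusable (c : Char) : Bool := "S8O0I1BZ2".toList.contains c

-- the two-pointer while loop of B: the inner `while … not in _CONFUSABLE` advancing j is the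
-- takeWhile/dropWhile split of the remaining suffix; the copied slice num[i:j] is the run,
-- then the confusable char (if any) is wrapped and the loop resumes at j+1.
def pvRuns : List Char → List (List Char)
  | [] => []
  | a :: t =>
      let run := (a :: t).takeWhile (fun c => !pvConfusable c)
      let rest := (a :: t).dropWhile (fun c => !pvConfusable c)
      if rest.isEmpty then [run]
      else run :: pvWrap (rest.headD ' ') :: pvRuns rest.tail
termination_by l => l.length
decreasing_by
  have h1 : ((a :: t).dropWhile (fun c => !pvConfusable c)).length ≤ (a :: t).length :=
    List.length_dropWhile_le _ _
  have h2 : ((a :: t).dropWhile (fun c => !pvConfusable c)).tail.length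
      = ((a :: t).dropWhile (fun c => !pvConfusable c)).length - 1 := List.length_tail
  simp at h1 h2 ⊢
  omega

def highlight_confusions_alt (num : String) : String :=
  String.ofList (pvRuns num.toList).flatten

-- ===== PRECONDITION & SPEC =====
def Spec_highlight_confusions (num : String) (out : String) : Prop := out = highlight_confusions_alt num
instance (num : String) (out : String) : Decidable (Spec_highlight_confusions num out) := by unfold Spec_highlight_confusions; infer_instance

-- ===== CLAIM (what is proved, stated in full; the proofs are below) =====
def Claim_equal_highlight_confusions : Prop := ∀ (num : String), Dom_highlight_confusions num → Spec_highlight_confusions num (highlight_confusions num)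

-- ===== LEMMAS AND PROOFS =====

-- A's membership test (keys ∪ values of confusion_pairs) is B's confusable set
theorem pv_memb_eq (c : Char) :
    (pvConfKeys.contains c || pvConfVals.contains c) = pvConfusable c := by
  by_cases h1 : c = 'S' <;> by_cases h2 : c = '8' <;> by_cases h3 : c = 'O'
    <;> by_cases h4 : c = '0' <;> by_cases h5 : c = 'I' <;> by_cases h6 : c = '1'
    <;> by_cases h7 : c = 'B' <;> by_cases h8 : c = 'Z' <;> by_cases h9 : c = '2'
    <;> subst_vars <;> simp_all [pvConfKeys, pvConfVals, pvConfusable]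

-- per-character piece A appends
def pvPiece (c : Char) : List Char := if pvConfusable c then pvWrap c else [c]

-- a run of plain characters contributes itself
theorem pv_plain_flat (m : List Char) (hm : ∀ c ∈ m, pvConfusable c = false) :
    (m.map pvPiece).flatten = m := by
  induction m with
  | nil => rfl
  | cons c m ih =>
      have hc := hm c (by simp)
      simp [pvPiece, hc, ih (fun d hd => hm d (by simp [hd]))]

theorem pv_runs_flat (l : List Char) :
    (pvRuns l).flatten = (l.map pvPiece).flatten := by
  generalize hn : l.length = n
  induction n using Nat.strong_induction_on generalizing l with
  | _ n ih =>
    cases l with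
    | nil => rw [pvRuns]; rfl
    | cons a t =>
      have hsplit := List.takeWhile_append_dropWhile (p := fun c => !pvConfusable c) (l := a :: t)
      have hrun : ∀ c ∈ (a :: t).takeWhile (fun c => !pvConfusable c), pvConfusable c = false := by
        intro d hd
        simpa using List.mem_takeWhile_imp hd
      cases hre : (a :: t).dropWhile (fun c => !pvConfusable c) with
      | nil =>
          rw [hre] at hsplit
          rw [pvRuns]
          simp only [hre]
          conv_rhs => rw [← hsplit]
          simp [pv_plain_flat _ hrun]
      | cons c rest =>
          have hc : pvConfusable c = true := by
            have := List.head?_dropWhile_not (p := fun c => !pvConfusable c) (l := a :: t)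
            rw [hre] at this
            simpa using this
          have hlen : rest.length < n := by
            have h1 : ((a :: t).dropWhile (fun c => !pvConfusable c)).length ≤ (a :: t).length :=
              List.length_dropWhile_le _ _
            rw [hre] at h1
            simp at h1 hn
            omega
          rw [hre] at hsplit
          rw [pvRuns]
          simp only [hre]
          conv_rhs => rw [← hsplit]
          simp [pv_plain_flat _ hrun, ih rest.length hlen rest rfl, pvPiece, hc]

theorem pv_main (num : String) : highlight_confusions num = highlight_confusions_alt num := by
  unfold highlight_confusions highlight_confusions_alt
  congr 1
  have hf : (fun (acc : List Char) c =>
      if pvConfKeys.contains c || pvConfVals.contains c then acc ++ pvWrap c else acc ++ [c])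
      = (fun acc c => acc ++ pvPiece c) := by
    funext acc c; rw [pvPiece, ← pv_memb_eq]; split <;> rfl
  rw [hf, PySem.List.foldl_append_eq_flatMap, List.nil_append]
  simp [pv_runs_flat, List.flatMap_def]

-- ===== VERDICT (by name: the statement is the Claim_ definition above) =====
theorem highlight_confusions_spec : Claim_equal_highlight_confusions := by
  intro num _
  exact pv_main num
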